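-- pv_equiv track=rewrite | github.com/adzai/adventofcode | 2023/day9/solution.py | get_line_sub_sequences
-- ===== SOURCE A (Python) =====
-- def get_line_sub_sequences(line):
--     line_to_diff = line
--     all_sub_sequences = []
--     while True:
--         new_seq = []
--         for i, val in enumerate(line_to_diff[:-1]):
--             new_seq.append(line_to_diff[i + 1] - val)
--
--         all_sub_sequences.append(new_seq)
--
--         if not any(new_seq):
--             return all_sub_sequences
--
--         line_to_diff = new_seq
-- ===== SOURCE B (Python) =====
-- def get_line_sub_sequences(line):
--     diff = [b - a for a, b in zip(line, line[1:])]
--     if any(diff):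
--         return [diff] + get_line_sub_sequences(diff)
--     return [diff]
-- ===== Notes on version B (the rewrite author's own statement) =====
-- stated objective: simpler
-- what changed: Replaced the while-True loop with an explicit accumulator and index-based enumerate diffing by structural recursion on the shrinking difference level, computing each level with a single zip over adjacent pairs.
import Mathlib
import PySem

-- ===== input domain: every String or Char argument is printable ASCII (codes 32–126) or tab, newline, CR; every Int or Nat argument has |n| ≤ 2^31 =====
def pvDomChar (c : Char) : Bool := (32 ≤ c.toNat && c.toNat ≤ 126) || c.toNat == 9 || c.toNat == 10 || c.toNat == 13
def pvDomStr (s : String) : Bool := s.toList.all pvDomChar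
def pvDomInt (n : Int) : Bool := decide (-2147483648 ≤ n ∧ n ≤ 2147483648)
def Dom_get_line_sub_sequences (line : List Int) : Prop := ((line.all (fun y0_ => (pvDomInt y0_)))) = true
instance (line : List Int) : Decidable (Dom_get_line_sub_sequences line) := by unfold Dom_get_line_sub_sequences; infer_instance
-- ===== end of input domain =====

-- B re-implements the difference-table loop as structural recursion on the shrinking
-- difference level (zip of adjacent pairs); same value, different decomposition.

-- ===== PORT A =====
-- new_seq = [] ; for i, val in enumerate(line_to_diff[:-1]): new_seq.append(line_to_diff[i+1] - val)
-- (the index i+1 is always in range, so pyGetD's default 0 is never used)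
def pvNewSeqA (cur : List Int) : List Int :=
  (PySem.List.enumerate (PySem.List.slice cur none (some (-1))) 0).foldl
    (fun acc p => acc ++ [PySem.List.pyGetD cur (p.1 + 1) 0 - p.2]) []

theorem pvNewSeqA_len (cur : List Int) : (pvNewSeqA cur).length = cur.length - 1 := by
  rw [pvNewSeqA, PySem.List.foldl_append_singleton_eq_map, PySem.List.slice_to_neg_one]
  simp

-- the 'while True' loop of A, with the accumulator all_sub_sequences
def pvLoopA (cur : List Int) (acc : List (List Int)) : List (List Int) :=
  if (pvNewSeqA cur).any (fun x => x != 0) then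
    pvLoopA (pvNewSeqA cur) (acc ++ [pvNewSeqA cur])
  else acc ++ [pvNewSeqA cur]
termination_by cur.length
decreasing_by
  rename_i h
  have hne : pvNewSeqA cur ≠ [] := by
    intro hnil; rw [hnil] at h; simp at h
  have hl := pvNewSeqA_len cur
  have hc : cur ≠ [] := by
    intro hc; subst hc
    exact hne rfl
  have : 0 < cur.length := List.length_pos_iff.mpr hc
  omega

def get_line_sub_sequences (line : List Int) : List (List Int) :=
  pvLoopA line []

-- ===== PORT B =====
-- diff = [b - a for a, b in zip(line, line[1:])]
def pvDiffB (line : List Int) : List Int :=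
  (line.zip line.tail).map (fun p => p.2 - p.1)

theorem pvDiffB_len (line : List Int) : (pvDiffB line).length = line.length - 1 := by
  rcases line with _ | ⟨a, t⟩ <;> simp [pvDiffB]

def get_line_sub_sequences_alt (line : List Int) : List (List Int) :=
  if (pvDiffB line).any (fun x => x != 0) then
    pvDiffB line :: get_line_sub_sequences_alt (pvDiffB line)
  else [pvDiffB line]
termination_by line.length
decreasing_by
  rename_i h
  have hne : pvDiffB line ≠ [] := by
    intro hnil; rw [hnil] at h; simp at h
  have hl := pvDiffB_len line
  have hc : line ≠ [] := by
    intro hc; subst hc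
    exact hne rfl
  have : 0 < line.length := List.length_pos_iff.mpr hc
  omega

-- ===== PRECONDITION & SPEC =====
def Spec_get_line_sub_sequences (line : List Int) (out : List (List Int)) : Prop := out = get_line_sub_sequences_alt line
instance (line : List Int) (out : List (List Int)) : Decidable (Spec_get_line_sub_sequences line out) := by unfold Spec_get_line_sub_sequences; infer_instance

-- ===== CLAIM (what is proved, stated in full; the proofs are below) =====
def Claim_equal_get_line_sub_sequences : Prop := ∀ (line : List Int), Dom_get_line_sub_sequences line → Spec_get_line_sub_sequences line (get_line_sub_sequences line)

-- ===== LEMMAS AND PROOFS =====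

-- A's per-level difference equals B's zip-based one
theorem pvNewSeqA_eq (cur : List Int) : pvNewSeqA cur = pvDiffB cur := by
  apply List.ext_getElem
  · rw [pvNewSeqA_len, pvDiffB_len]
  · intro k h1 h2
    have hk : k < cur.length - 1 := by
      have := pvNewSeqA_len cur; omega
    simp only [pvNewSeqA, pvDiffB, PySem.List.foldl_append_singleton_eq_map,
      PySem.List.slice_to_neg_one, List.nil_append]
    rw [List.getElem_map, PySem.List.getElem_enumerate]
    have hk1 : ((0 : Int) + (k : Int)) + 1 = ((k + 1 : Nat) : Int) := by push_cast; ring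
    rw [hk1, PySem.List.pyGetD_natCast]
    have hlt : k + 1 < cur.length := by omega
    rw [List.getD_eq_getElem cur 0 hlt]
    simp [List.getElem_zip, List.getElem_tail, List.getElem_dropLast]

theorem pvLoop_eq (n : ℕ) : ∀ (cur : List Int), cur.length ≤ n → ∀ (acc : List (List Int)),
    pvLoopA cur acc = acc ++ get_line_sub_sequences_alt cur := by
  induction n with
  | zero =>
    intro cur hlen acc
    have hc : cur = [] := by rcases cur with _ | _ <;> simp_all
    subst hc
    rw [pvLoopA, get_line_sub_sequences_alt]
    simp [pvNewSeqA_eq, pvDiffB]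
  | succ n ih =>
    intro cur hlen acc
    rw [pvLoopA, get_line_sub_sequences_alt, pvNewSeqA_eq]
    by_cases h : (pvDiffB cur).any (fun x => x != 0) = true
    · simp only [h, if_true]
      have hne : pvDiffB cur ≠ [] := by intro hnil; rw [hnil] at h; simp at h
      have hcur : cur ≠ [] := by
        intro hc; subst hc; exact hne rfl
      have hlen' : (pvDiffB cur).length ≤ n := by
        have := pvDiffB_len cur
        have : 0 < cur.length := List.length_pos_iff.mpr hcur
        omega
      rw [ih (pvDiffB cur) hlen' (acc ++ [pvDiffB cur])]
      simp
    · simp [h]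

-- ===== VERDICT (by name: the statement is the Claim_ definition above) =====
theorem get_line_sub_sequences_spec : Claim_equal_get_line_sub_sequences := by
  intro line _
  unfold Spec_get_line_sub_sequences
  have := pvLoop_eq line.length line le_rfl []
  simpa [get_line_sub_sequences] using this
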